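-- pv_equiv track=rewrite | github.com/bintiw/synthesis-707 | consistencyCheck.py | compare
-- ===== SOURCE A (Python) =====
-- def compare(l, r):
--     out = 1
--     m = len(r)
--     for i in range(len(l)):
--         if l[i] != r[i%m] and l[i] != 2 and r[i%m] != 2:
--             return 0
--         if l[i] != r[i%m] and r[i%m] != 2:
--             out += 1
--     return out
-- ===== SOURCE B (Python) =====
-- def compare(l, r):
--     # Column-wise check: position i is matched against r[i % len(r)], so group
--     # l by residue class (stride slices) and judge each column against its r-value.
--     out = 1
--     for j, y in enumerate(r):
--         if y == 2:
--             continue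
--         col = l[j::len(r)]
--         if any(x != y and x != 2 for x in col):
--             return 0
--         out += col.count(2)
--     return out
-- ===== Notes on version B (the rewrite author's own statement) =====
-- stated objective: alternative
-- what changed: Replaced A's single fused index loop (pairing via i % len(r), early return, running counter) by a column-wise algorithm: iterate over r, take each residue-class stride slice l[j::len(r)], skip wildcard columns, any-scan a column for a hard mismatch and add its count of left-side wildcards.
import Mathlib
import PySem

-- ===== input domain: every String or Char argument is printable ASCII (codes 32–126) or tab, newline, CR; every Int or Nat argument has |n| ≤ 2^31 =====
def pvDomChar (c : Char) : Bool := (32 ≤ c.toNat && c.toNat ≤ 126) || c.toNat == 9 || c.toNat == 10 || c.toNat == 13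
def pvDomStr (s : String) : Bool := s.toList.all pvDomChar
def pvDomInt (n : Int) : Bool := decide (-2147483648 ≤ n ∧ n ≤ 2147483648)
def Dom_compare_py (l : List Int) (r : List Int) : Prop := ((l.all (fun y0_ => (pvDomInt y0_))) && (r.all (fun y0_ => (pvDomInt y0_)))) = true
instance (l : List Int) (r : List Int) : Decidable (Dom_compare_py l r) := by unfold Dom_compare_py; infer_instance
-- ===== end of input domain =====

-- B replaces A's fused index loop (i % m pairing, early return) by a column-wise
-- algorithm: it iterates over r, extracts each residue-class stride slice l[j::len(r)],
-- and judges whole columns (any-scan + count of wildcards); same O(n) cost.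
-- Where A raises ZeroDivisionError (l nonempty, r empty, outside Pre_) B returns 1.


-- ===== PORT A =====
-- A's for-loop with early return, recursing over the index list; l.getD i 0 is safe (i < l.length) and i % r.length mirrors i % m (exact for r ≠ []).
def compareLoopA (l : List Int) (r : List Int) : List Nat → Int → Int
  | [], out => out
  | i :: is, out =>
    let li := l.getD i 0
    let ri := r.getD (i % r.length) 0
    if li ≠ ri ∧ li ≠ 2 ∧ ri ≠ 2 then 0
    else compareLoopA l r is (if li ≠ ri ∧ ri ≠ 2 then out + 1 else out)

def compare_py (l : List Int) (r : List Int) : Int :=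
  compareLoopA l r (List.range l.length) 1

-- ===== PORT B =====
-- Hand port of the stride slice l[j::m] (exact for 0 ≤ j and step m ≥ 1, as used in the loop):
-- take the head, then skip m-1 elements, repeat.
def strideEvery (m : Nat) : List Int → List Int
  | [] => []
  | x :: rest => x :: strideEvery m (rest.drop (m - 1))
termination_by xs => xs.length
decreasing_by simp

-- B's for-loop over enumerate(r) with early return 0 and 'continue' on y == 2;
-- the enumerate index j is a nonnegative Int, so j.toNat is exact.
def compareLoopB (l : List Int) (m : Nat) : List (Int × Int) → Int → Int
  | [], out => out
  | (j, y) :: rest, out =>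
    if y = 2 then compareLoopB l m rest out
    else
      let col := strideEvery m (l.drop j.toNat)
      if col.any (fun x => !(x == y) && !(x == 2)) then 0
      else compareLoopB l m rest (out + (col.count 2 : Int))

def compare_py_alt (l : List Int) (r : List Int) : Int :=
  compareLoopB l r.length (PySem.List.enumerate r) 1

-- ===== PRECONDITION & SPEC =====
-- Pre_ excludes only the inputs where Python A raises ZeroDivisionError (r empty with l nonempty; B's loop over r is empty there and returns 1).
def Pre_compare_py (l : List Int) (r : List Int) : Prop := l = [] ∨ r ≠ []
instance (l : List Int) (r : List Int) : Decidable (Pre_compare_py l r) := by unfold Pre_compare_py; infer_instance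
def pvWitness_compare_py : List Int × List Int := ([2, 1], [1, 2])

def Spec_compare_py (l : List Int) (r : List Int) (out : Int) : Prop := out = compare_py_alt l r
instance (l : List Int) (r : List Int) (out : Int) : Decidable (Spec_compare_py l r out) := by unfold Spec_compare_py; infer_instance

-- ===== CLAIM (what is proved, stated in full; the proofs are below) =====
def Claim_equal_compare_py : Prop := ∀ (l : List Int) (r : List Int), Dom_compare_py l r → Pre_compare_py l r → Spec_compare_py l r (compare_py l r)

-- ===== LEMMAS AND PROOFS =====

-- the position-wise predicates both sides reduce to
def hardP (l r : List Int) (i : Nat) : Bool :=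
  !(l.getD i 0 == r.getD (i % r.length) 0) && !(l.getD i 0 == 2) && !(r.getD (i % r.length) 0 == 2)
def cntP (l r : List Int) (i : Nat) : Bool :=
  (l.getD i 0 == 2) && !(r.getD (i % r.length) 0 == 2)

theorem compareLoopA_eq (l r : List Int) (is : List Nat) (out : Int) :
    compareLoopA l r is out =
      if is.any (hardP l r) then 0 else out + (is.countP (cntP l r) : Int) := by
  induction is generalizing out with
  | nil => simp [compareLoopA]
  | cons i is ih =>
    simp only [compareLoopA, List.any_cons, List.countP_cons]
    set li := l.getD i 0 with hli
    set ri := r.getD (i % r.length) 0 with hri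
    by_cases hbad : li ≠ ri ∧ li ≠ 2 ∧ ri ≠ 2
    · have hh : hardP l r i = true := by
        unfold hardP; rw [← hli, ← hri]; simp [hbad.1, hbad.2.1, hbad.2.2]
      rw [if_pos hbad, hh]; simp
    · rw [if_neg hbad, ih]
      have hb : hardP l r i = false := by
        unfold hardP; rw [← hli, ← hri]
        by_cases h1 : li = ri <;> by_cases h2 : li = 2 <;> by_cases h3 : ri = 2 <;> simp_all
      rw [hb, Bool.false_or]
      by_cases hany : (is.any (hardP l r)) = true
      · rw [if_pos hany, if_pos hany]
      · rw [if_neg hany, if_neg hany]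
        by_cases hc : li ≠ ri ∧ ri ≠ 2
        · have hli2 : li = 2 := by
            by_contra h2
            exact hbad ⟨hc.1, h2, hc.2⟩
          rw [if_pos hc]
          have : cntP l r i = true := by unfold cntP; rw [← hli, ← hri]; simp [hli2, hc.2]
          rw [this]
          simp only [if_true]
          push_cast
          ring
        · rw [if_neg hc]
          have : cntP l r i = false := by
            unfold cntP; rw [← hli, ← hri]
            by_cases h2 : li = 2 <;> by_cases h3 : ri = 2 <;> simp_all
          rw [this]
          simp

theorem filter_range_nil (m j n : Nat) (hj : j < m) (hn : n ≤ j) :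
    (List.range n).filter (fun i => i % m == j) = [] := by
  rw [List.filter_eq_nil_iff]
  intro i hi
  rw [List.mem_range] at hi
  have h1 : i % m = i := Nat.mod_eq_of_lt (by omega)
  simp [h1]; omega

theorem filter_range_mod (m j : Nat) (hj : j < m) :
    ∀ n, j < n → (List.range n).filter (fun i => i % m == j)
      = j :: (((List.range (n - m)).filter (fun i => i % m == j)).map (· + m)) := by
  intro n
  induction n with
  | zero => omega
  | succ n ih =>
    intro hjn
    rw [List.range_succ, List.filter_append]
    by_cases hjlt : j < n
    · rw [ih hjlt]
      by_cases hmn : m ≤ n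
      · have h1 : n + 1 - m = (n - m) + 1 := by omega
        rw [h1, List.range_succ, List.filter_append, List.map_append]
        have hmod : (n - m) % m = n % m := by
          conv_rhs => rw [show n = (n - m) + m by omega]
          rw [Nat.add_mod_right]
        by_cases hc : n % m = j
        · simp [List.filter_cons, hc, hmod, show n - m + m = n by omega]
        · have : (n - m) % m ≠ j := by omega
          simp [List.filter_cons, hc, this]
      · have h1 : n + 1 - m = 0 := by omega
        have h2 : n - m = 0 := by omega
        have h3 : n % m = n := Nat.mod_eq_of_lt (by omega)
        rw [h1, h2]
        simp [List.filter_cons, h3, show n ≠ j by omega]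
    · have hje : j = n := by omega
      subst hje
      rw [filter_range_nil m j j hj (le_refl j)]
      have h1 : j + 1 - m = 0 := by omega
      have h2 : j % m = j := Nat.mod_eq_of_lt hj
      rw [h1]
      simp [List.filter_cons, h2]

theorem getD_drop (l : List Int) (m i : Nat) : (l.drop m).getD i 0 = l.getD (i + m) 0 := by
  simp [List.getD_eq_getElem?_getD, List.getElem?_drop, Nat.add_comm]

theorem stride_eq (m : Nat) (hm : 1 ≤ m) (l : List Int) (j : Nat) (hj : j < m) :
    strideEvery m (l.drop j)
      = ((List.range l.length).filter (fun i => i % m == j)).map (fun i => l.getD i 0) := by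
  by_cases hjn : j < l.length
  · rw [List.drop_eq_getElem_cons hjn]
    rw [strideEvery]
    rw [List.drop_drop, show j + 1 + (m - 1) = j + m by omega]
    have h2 : l.drop (j + m) = (l.drop m).drop j := by
      rw [List.drop_drop]; congr 1; omega
    rw [h2, stride_eq m hm (l.drop m) j hj, filter_range_mod m j hj l.length hjn]
    simp only [List.map_cons, List.map_map, List.length_drop]
    congr 1
    · exact (List.getD_eq_getElem l 0 hjn).symm
    · apply List.map_congr_left
      intro i _
      simp [Function.comp, getD_drop, Nat.add_comm]
  · rw [List.drop_eq_nil_of_le (by omega), filter_range_nil m j l.length hj (by omega)]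
    simp [strideEvery]
termination_by l.length
decreasing_by simp; omega

def badJ (l : List Int) (m : Nat) (p : Int × Int) : Bool :=
  !(p.2 == 2) && (strideEvery m (l.drop p.1.toNat)).any (fun x => !(x == p.2) && !(x == 2))
def termJ (l : List Int) (m : Nat) (p : Int × Int) : Int :=
  if p.2 == 2 then 0 else ((strideEvery m (l.drop p.1.toNat)).count 2 : Int)

theorem compareLoopB_eq (l : List Int) (m : Nat) (L : List (Int × Int)) (out : Int) :
    compareLoopB l m L out = if L.any (badJ l m) then 0 else out + (L.map (termJ l m)).sum := by
  induction L generalizing out with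
  | nil => simp [compareLoopB]
  | cons p rest ih =>
    obtain ⟨j, y⟩ := p
    simp only [compareLoopB, List.any_cons, List.map_cons, List.sum_cons]
    by_cases hy : y = 2
    · subst hy
      rw [if_pos rfl, ih]
      have h1 : badJ l m (j, 2) = false := by simp [badJ]
      have h2 : termJ l m (j, 2) = 0 := by simp [termJ]
      rw [h1, h2, Bool.false_or, zero_add]
    · rw [if_neg hy]
      by_cases hb : (strideEvery m (l.drop j.toNat)).any (fun x => !(x == y) && !(x == 2)) = true
      · have : badJ l m (j, y) = true := by simp [badJ, hy, hb]
        simp [hb, this]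
      · have hbj : badJ l m (j, y) = false := by
          simp only [badJ]; rw [Bool.and_eq_false_iff]; right
          simpa using hb
        have htj : termJ l m (j, y) = ((strideEvery m (l.drop j.toNat)).count 2 : Int) := by
          simp [termJ, hy]
        rw [if_neg (by simpa using hb), ih, hbj, htj, Bool.false_or]
        split <;> ring

theorem sum_ite_eq_mem (c : Int) (k : Nat) :
    ∀ m, k < m → ((List.range m).map fun j => if k = j then c else 0).sum = c := by
  intro m
  induction m with
  | zero => omega
  | succ m ih =>
    intro hk
    rw [List.range_succ, List.map_append, List.sum_append]
    by_cases h : k < m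
    · rw [ih h]
      simp [show k ≠ m by omega]
    · have hk2 : k = m := by omega
      have hz : ((List.range m).map fun j => if k = j then c else 0).sum = 0 := by
        apply List.sum_eq_zero
        intro x hx
        rw [List.mem_map] at hx
        obtain ⟨j, hj, hjx⟩ := hx
        rw [List.mem_range] at hj
        rw [← hjx, if_neg (by omega)]
      rw [hz]
      simp [hk2]

theorem count_decomp (m n : Nat) (hm : 1 ≤ m) (p : Nat → Bool) :
    ((List.range m).map fun j => (((List.range n).filter (fun i => i % m == j)).countP p : Int)).sum
      = ((List.range n).countP p : Int) := by
  induction n with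
  | zero => simp
  | succ n ih =>
    rw [List.range_succ, List.countP_append]
    have hsplit : ∀ j, (((List.range n ++ [n]).filter (fun i => i % m == j)).countP p : Int)
        = (((List.range n).filter (fun i => i % m == j)).countP p : Int)
          + (if n % m = j then (if p n then 1 else 0) else 0) := by
      intro j
      rw [List.filter_append, List.countP_append]
      push_cast
      congr 1
      by_cases h1 : n % m = j
      · simp [List.filter_cons, h1]
      · simp [List.filter_cons, h1]
    calc ((List.range m).map fun j => (((List.range n ++ [n]).filter (fun i => i % m == j)).countP p : Int)).sum
        = ((List.range m).map fun j =>
            (((List.range n).filter (fun i => i % m == j)).countP p : Int)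
              + (if n % m = j then (if p n then 1 else 0) else 0)).sum := by
          exact congrArg List.sum (List.map_congr_left (fun j _ => hsplit j))
      _ = ((List.range m).map fun j => (((List.range n).filter (fun i => i % m == j)).countP p : Int)).sum
            + ((List.range m).map fun j => (if n % m = j then (if p n then 1 else 0) else 0)).sum := by
          exact PySem.List.sum_map_add_int _ _ _
      _ = ((List.range n).countP p : Int) + (if p n then 1 else 0) := by
          rw [ih, sum_ite_eq_mem _ _ m (Nat.mod_lt n (by omega))]
      _ = _ := by
          rw [List.countP_cons, List.countP_nil]
          push_cast
          split <;> simp <;> ring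

theorem any_congr_mem {α : Type} (xs : List α) (p q : α → Bool)
    (h : ∀ a ∈ xs, p a = q a) : xs.any p = xs.any q := by
  induction xs with
  | nil => rfl
  | cons a xs ih =>
    simp only [List.any_cons, h a (by simp)]
    rw [ih (fun b hb => h b (by simp [hb]))]

theorem any_decomp (l r : List Int) (hm : 1 ≤ r.length) :
    ((List.range r.length).any fun j =>
        !(r.getD j 0 == 2) &&
          ((((List.range l.length).filter (fun i => i % r.length == j)).map (fun i => l.getD i 0)).any
            (fun x => !(x == r.getD j 0) && !(x == 2))))
      = (List.range l.length).any (hardP l r) := by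
  rw [Bool.eq_iff_iff]
  simp only [hardP, List.any_eq_true, List.mem_range, List.mem_map, List.mem_filter,
    Bool.and_eq_true, Bool.not_eq_eq_eq_not, Bool.not_true, beq_eq_false_iff_ne, ne_eq]
  constructor
  · rintro ⟨j, hj, hy2, x, ⟨i, ⟨hi, hij⟩, rfl⟩, hxy, hx2⟩
    have hij' : i % r.length = j := by simpa using hij
    exact ⟨i, hi, ⟨by rw [hij']; exact hxy, hx2⟩, by rw [hij']; exact hy2⟩
  · rintro ⟨i, hi, ⟨hxy, hx2⟩, hy2⟩
    exact ⟨i % r.length, Nat.mod_lt i (by omega), hy2,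
      l.getD i 0, ⟨i, ⟨hi, by simp⟩, rfl⟩, hxy, hx2⟩

theorem count_col (l r : List Int) (j : Nat) (hm : 1 ≤ r.length) (hj : j < r.length) :
    (if r.getD j 0 = 2 then 0
      else ((((List.range l.length).filter (fun i => i % r.length == j)).map (fun i => l.getD i 0)).count 2 : Int))
      = (((List.range l.length).filter (fun i => i % r.length == j)).countP (cntP l r) : Int) := by
  have hmem : ∀ i ∈ (List.range l.length).filter (fun i => i % r.length == j), i % r.length = j := by
    intro i hi
    rw [List.mem_filter] at hi
    simpa using hi.2
  by_cases hy : r.getD j 0 = 2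
  · rw [if_pos hy]
    have : ((List.range l.length).filter (fun i => i % r.length == j)).countP (cntP l r) = 0 := by
      rw [List.countP_eq_zero]
      intro i hi
      unfold cntP
      rw [hmem i hi, hy]
      simp
    rw [this]; simp
  · rw [if_neg hy, List.count_eq_countP, List.countP_map]
    have hc := List.countP_congr
      (p := (fun x => x == 2) ∘ fun i => l.getD i 0) (q := cntP l r)
      (l := (List.range l.length).filter (fun i => i % r.length == j))
      (fun i hi => by
        unfold cntP; rw [hmem i hi]; simp [Function.comp]
        intro _; simpa [List.getD_eq_getElem?_getD] using hy)
    rw [hc]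

theorem altB_canon (l r : List Int) (hr : r ≠ []) :
    compare_py_alt l r =
      if (List.range l.length).any (hardP l r) then 0
      else 1 + ((List.range l.length).countP (cntP l r) : Int) := by
  have hm : 1 ≤ r.length := by
    cases r with
    | nil => exact absurd rfl hr
    | cons a as => simp
  unfold compare_py_alt
  rw [compareLoopB_eq, PySem.List.enumerate_eq_map_pyRange r 0, PySem.List.len_eq,
    PySem.List.pyRange_zero_natCast, List.map_map, List.any_map, List.map_map]
  have hb : ∀ j ∈ List.range r.length,
      (badJ l r.length ∘ (fun j => (j, PySem.List.pyGetD r j 0)) ∘ (fun k : Nat => (k : Int))) j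
        = (fun j => !(r.getD j 0 == 2) &&
            ((((List.range l.length).filter (fun i => i % r.length == j)).map (fun i => l.getD i 0)).any
              (fun x => !(x == r.getD j 0) && !(x == 2)))) j := by
    intro j hj
    rw [List.mem_range] at hj
    simp only [Function.comp, badJ, PySem.List.pyGetD_natCast, Int.toNat_natCast]
    rw [stride_eq r.length hm l j hj]
  have ht : ∀ j ∈ List.range r.length,
      ((termJ l r.length ∘ (fun j => (j, PySem.List.pyGetD r j 0)) ∘ (fun k : Nat => (k : Int))) j : Int)
        = (((List.range l.length).filter (fun i => i % r.length == j)).countP (cntP l r) : Int) := by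
    intro j hj
    rw [List.mem_range] at hj
    simp only [Function.comp, termJ, PySem.List.pyGetD_natCast, Int.toNat_natCast, beq_iff_eq]
    rw [stride_eq r.length hm l j hj]
    exact count_col l r j hm hj
  rw [any_congr_mem _ _ _ hb, List.map_congr_left ht, any_decomp l r hm, count_decomp r.length l.length hm]

-- ===== VERDICT (by name: the statement is the Claim_ definition above) =====
theorem compare_py_spec : Claim_equal_compare_py := by
  intro l r _ hpre
  unfold Spec_compare_py
  rcases hpre with hl | hr
  · subst hl
    cases r with
    | nil => rfl
    | cons a as =>
      rw [altB_canon [] (a :: as) (by simp)]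
      simp [compare_py, compareLoopA]
  · rw [altB_canon l r hr]
    unfold compare_py
    rw [compareLoopA_eq]
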